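-- pv_equiv track=rewrite | github.com/Gokulapps/Python | Coin_Distribution.py | no_of_ones
-- ===== SOURCE A (Python) =====
-- def no_of_ones(amount):
--     count=0
--     if(amount<1):
--         return amount,count
--     while(1):
--         if(amount<1):
--             return amount,count
--         amount-=1
--         count+=1
-- ===== SOURCE B (Python) =====
-- def no_of_ones(amount):
--     # Closed form: an integer amount >= 1 reaches 0 after exactly `amount` decrements.
--     if amount < 1:
--         return amount, 0
--     return 0, amount
-- ===== Notes on version B (the rewrite author's own statement) =====
-- stated objective: faster
-- what changed: Replaced the one-by-one decrement loop with the closed form (0, amount) for amount >= 1.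
import Mathlib
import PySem

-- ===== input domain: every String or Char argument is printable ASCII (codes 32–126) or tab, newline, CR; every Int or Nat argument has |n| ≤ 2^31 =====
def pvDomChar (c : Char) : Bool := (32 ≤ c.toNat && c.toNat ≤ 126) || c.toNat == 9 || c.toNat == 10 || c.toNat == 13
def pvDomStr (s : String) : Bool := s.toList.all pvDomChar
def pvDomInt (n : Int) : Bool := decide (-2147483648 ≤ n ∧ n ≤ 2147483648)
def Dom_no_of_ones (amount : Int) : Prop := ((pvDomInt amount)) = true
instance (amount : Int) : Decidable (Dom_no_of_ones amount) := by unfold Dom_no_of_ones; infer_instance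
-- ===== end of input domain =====

-- B replaces A's unit-decrement loop by the closed form (0, amount); objective: faster (asymptotic).


-- ===== PORT A =====
-- the while(1) loop: each iteration checks amount<1, else decrements amount and bumps count
def noOfOnesLoop (amount count : Int) : List Int :=
  if amount < 1 then [amount, count]
  else noOfOnesLoop (amount - 1) (count + 1)
termination_by amount.toNat
decreasing_by
  have h : ¬ amount < 1 := by assumption
  omega

def no_of_ones (amount : Int) : List Int :=
  if amount < 1 then [amount, 0]
  else noOfOnesLoop amount 0

-- ===== PORT B =====
def no_of_ones_alt (amount : Int) : List Int :=
  if amount < 1 then [amount, 0]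
  else [0, amount]

-- ===== PRECONDITION & SPEC =====
def Spec_no_of_ones (amount : Int) (out : List Int) : Prop := out = no_of_ones_alt amount
instance (amount : Int) (out : List Int) : Decidable (Spec_no_of_ones amount out) := by unfold Spec_no_of_ones; infer_instance

-- ===== CLAIM (what is proved, stated in full; the proofs are below) =====
def Claim_equal_no_of_ones : Prop := ∀ (amount : Int), Dom_no_of_ones amount → Spec_no_of_ones amount (no_of_ones amount)

-- ===== LEMMAS AND PROOFS =====
theorem noOfOnesLoop_eq_aux : ∀ (n : Nat) (amount count : Int), amount.toNat = n → 1 ≤ amount →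
    noOfOnesLoop amount count = [0, count + amount] := by
  intro n
  induction n with
  | zero => intro amount count hn h; omega
  | succ n ih =>
    intro amount count hn h
    rw [noOfOnesLoop]
    have h1 : ¬ amount < 1 := by omega
    simp only [if_neg h1]
    by_cases h2 : 1 ≤ amount - 1
    · rw [ih (amount - 1) (count + 1) (by omega) h2]
      have hc : count + 1 + (amount - 1) = count + amount := by ring
      rw [hc]
    · have ha : amount = 1 := by omega
      subst ha
      rw [noOfOnesLoop, noOfOnesLoop]
      norm_num

theorem noOfOnesLoop_eq (amount count : Int) (h : 1 ≤ amount) :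
    noOfOnesLoop amount count = [0, count + amount] :=
  noOfOnesLoop_eq_aux amount.toNat amount count rfl h

-- ===== VERDICT (by name: the statement is the Claim_ definition above) =====
theorem no_of_ones_spec : Claim_equal_no_of_ones := by
  intro amount _
  unfold Spec_no_of_ones no_of_ones no_of_ones_alt
  by_cases h : amount < 1
  · simp [h]
  · simp only [if_neg h]
    rw [noOfOnesLoop_eq amount 0 (by omega)]
    simp
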